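-- pv_equiv track=rewrite | github.com/spjuhel/BoARIO | boario/utils/misc.py | print_summary
-- ===== SOURCE A (Python) =====
-- import textwrap
--
-- def print_summary(my_list):
--     if my_list:
--         current_element = None
--         current_count = 0
--         summary = []
--         for element in my_list:
--             if element != current_element:
--                 if current_element is not None:
--                     if current_count == 1:
--                         summary.append(str(current_element))
--                     else:
--                         summary.append(f"{current_element} (x {current_count})")
--                 current_element = element
--                 current_count = 1
--             else:
--                 current_count += 1
--         if current_element is not None:
--             if current_count == 1:
--                 summary.append(str(current_element))
--             else:
--                 summary.append(f"{current_element} (x {current_count})")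
--         total_length = len(my_list)
--         total_sum = sum(my_list)
--         summary_string = (
--             "[" + ", ".join(summary) + f"] (len: {total_length}, sum: {total_sum})"
--         )
--         return textwrap.wrap(summary_string, width=80)
--     else:
--         return ""
-- ===== SOURCE B (Python) =====
-- import textwrap
--
-- def print_summary(my_list):
--     if not my_list:
--         return ""
--     n = len(my_list)
--     starts = [i for i in range(n) if i == 0 or my_list[i] != my_list[i - 1]]
--     ends = starts[1:] + [n]
--     summary = [
--         str(my_list[s]) if e - s == 1 else f"{my_list[s]} (x {e - s})"
--         for s, e in zip(starts, ends)
--     ]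
--     summary_string = "[" + ", ".join(summary) + f"] (len: {n}, sum: {sum(my_list)})"
--     return textwrap.wrap(summary_string, width=80)
-- ===== Notes on version B (the rewrite author's own statement) =====
-- stated objective: alternative
-- what changed: Instead of streaming the list through a stateful run-length accumulator, B computes in staged passes the set of run-start indices (positions whose element differs from its predecessor), pairs each start with the next start via zip, and renders each run from the index difference alone.
-- outside the precondition, e.g. on print_summary([]): A returns '', B returns ''
import Mathlib
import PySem

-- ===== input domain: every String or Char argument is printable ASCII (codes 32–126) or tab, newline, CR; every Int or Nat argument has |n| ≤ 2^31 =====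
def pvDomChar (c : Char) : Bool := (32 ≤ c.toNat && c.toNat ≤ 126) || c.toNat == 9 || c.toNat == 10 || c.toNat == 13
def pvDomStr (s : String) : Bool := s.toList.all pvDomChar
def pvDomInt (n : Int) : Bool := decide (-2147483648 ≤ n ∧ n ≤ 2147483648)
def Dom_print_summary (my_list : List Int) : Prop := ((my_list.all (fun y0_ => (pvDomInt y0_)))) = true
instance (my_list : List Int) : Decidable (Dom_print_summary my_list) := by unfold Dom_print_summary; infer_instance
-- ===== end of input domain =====

-- B replaces A's stateful run-length accumulator with staged passes: it collects the
-- run-start indices, zips each with the next, and renders runs from index differences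
-- (alternative decomposition, same cost). Pre_ excludes only [] (A returns the string '').


-- shared rendering of one run (the f-string both Pythons use)
def renderRun (e : Int) (c : Int) : String :=
  if c = 1 then PySem.Int.toStr e
  else PySem.Int.toStr e ++ " (x " ++ PySem.Int.toStr c ++ ")"

-- textwrap.wrap(s, width=80), ported by hand; exact for strings that consist of
-- single-space-separated nonempty ASCII words each shorter than the width (the only
-- strings both programs feed it): greedy fill of words onto lines of length ≤ width.
def wrapWords (width : Int) (ws : List String) : List String :=
  let st := ws.foldl (fun (st : List String × String) w =>
      let (lines, cur) := st
      if cur = "" then (lines, w)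
      else if PySem.Str.len cur + 1 + PySem.Str.len w ≤ width then
        (lines, cur ++ " " ++ w)
      else (lines ++ [cur], w)) ([], "")
  if st.2 = "" then st.1 else st.1 ++ [st.2]

def textwrapWrap80 (s : String) : List String :=
  match PySem.Str.split? s " " with  -- sep ≠ "", so always some
  | some ws => wrapWords 80 ws
  | none => []

-- ===== PORT A =====
def pyFlush (ce : Option Int) (cc : Int) (summary : List String) : List String :=
  match ce with
  | none => summary
  | some e => summary ++ [renderRun e cc]

def print_summary (my_list : List Int) : List String :=
  if my_list ≠ [] then
    let st := my_list.foldl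
      (fun (st : Option Int × Int × List String) element =>
        let (ce, cc, summary) := st
        if some element ≠ ce then
          (some element, 1, pyFlush ce cc summary)
        else
          (ce, cc + 1, summary))
      (none, 0, [])
    let summary := pyFlush st.1 st.2.1 st.2.2
    let total_length : Int := my_list.length
    let total_sum : Int := my_list.sum
    let summary_string :=
      "[" ++ PySem.Str.join ", " summary ++ "] (len: " ++ PySem.Int.toStr total_length
        ++ ", sum: " ++ PySem.Int.toStr total_sum ++ ")"
    textwrapWrap80 summary_string
  else []  -- Python A returns the string "" here (not a list); excluded by Pre_

-- ===== PORT B =====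
-- starts = [i for i in range(n) if i == 0 or my_list[i] != my_list[i-1]]
-- (my_list[i], my_list[i-1] are in range and i-1 is only read when i ≥ 1, so getD is exact)
def bStarts (xs : List Int) : List Nat :=
  (List.range xs.length).filter (fun i => i == 0 || decide (xs.getD i 0 ≠ xs.getD (i - 1) 0))

def print_summary_alt (my_list : List Int) : List String :=
  if my_list ≠ [] then
    let n := my_list.length
    let starts := bStarts my_list
    let ends := starts.tail ++ [n]          -- starts[1:] + [n]
    let summary := (starts.zip ends).map
      (fun p => renderRun (my_list.getD p.1 0) ((p.2 : Int) - (p.1 : Int)))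
    let summary_string :=
      "[" ++ PySem.Str.join ", " summary ++ "] (len: " ++ PySem.Int.toStr (n : Int)
        ++ ", sum: " ++ PySem.Int.toStr my_list.sum ++ ")"
    textwrapWrap80 summary_string
  else []  -- Python B returns "" here; excluded by Pre_

-- ===== PRECONDITION & SPEC =====
-- Pre_ excludes only the empty list, on which A (and B) return the string '' instead of
-- a value of the declared list-of-strings type.
def Pre_print_summary (my_list : List Int) : Prop := my_list ≠ []
instance (my_list : List Int) : Decidable (Pre_print_summary my_list) := by
  unfold Pre_print_summary; infer_instance

def pvWitness_print_summary : List Int := [3, 3, 7]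

def Spec_print_summary (my_list : List Int) (out : List String) : Prop := out = print_summary_alt my_list
instance (my_list : List Int) (out : List String) : Decidable (Spec_print_summary my_list out) := by unfold Spec_print_summary; infer_instance

-- ===== CLAIM (what is proved, stated in full; the proofs are below) =====
def Claim_equal_print_summary : Prop := ∀ (my_list : List Int), Dom_print_summary my_list → Pre_print_summary my_list → Spec_print_summary my_list (print_summary my_list)

-- ===== LEMMAS AND PROOFS =====

-- common run-length characterization: list of (element, count) runs
def groupbyRunsAux (e : Int) (c : Int) : List Int → List (Int × Int)
  | [] => [(e, c)]
  | x :: xs => if x = e then groupbyRunsAux e (c + 1) xs else (e, c) :: groupbyRunsAux x 1 xs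

def groupbyRuns : List Int → List (Int × Int)
  | [] => []
  | x :: xs => groupbyRunsAux x 1 xs

-- A's loop produces the rendered runs
lemma loop_eq_runsAux (xs : List Int) : ∀ (e cc : Int) (s : List String),
    (let st := xs.foldl
      (fun (st : Option Int × Int × List String) element =>
        let (ce, cc, summary) := st
        if some element ≠ ce then
          (some element, 1, pyFlush ce cc summary)
        else
          (ce, cc + 1, summary))
      (some e, cc, s)
     pyFlush st.1 st.2.1 st.2.2)
    = s ++ (groupbyRunsAux e cc xs).map (fun p => renderRun p.1 p.2) := by
  induction xs with
  | nil => intro e cc s; simp [pyFlush, groupbyRunsAux]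
  | cons x xs ih =>
    intro e cc s
    by_cases h : x = e
    · subst h
      simpa [groupbyRunsAux] using ih x (cc + 1) s
    · simp only [List.foldl_cons, groupbyRunsAux, if_neg h]
      have hne : some x ≠ some e := by simpa using h
      simp only [if_pos hne, List.map_cons]
      rw [show pyFlush (some e) cc s = s ++ [renderRun e cc] from rfl]
      rw [ih x 1 (s ++ [renderRun e cc])]
      simp

-- B side: (element, count) pairs read off a list of run-start indices
def pairsFrom (xs : List Int) (l : List Nat) (n : Nat) : List (Int × Int) :=
  (l.zip (l.tail ++ [n])).map (fun p => (xs.getD p.1 0, (p.2 : Int) - (p.1 : Int)))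

-- run starts of t relative to a preceding element prev
def relStarts (prev : Int) (t : List Int) : List Nat :=
  (List.range t.length).filter (fun i => decide (t.getD i 0 ≠ (prev :: t).getD i 0))

lemma pairsFrom_shift (y : Int) (t : List Int) (l : List Nat) (n : Nat) :
    pairsFrom (y :: t) (l.map (· + 1)) (n + 1) = pairsFrom t l n := by
  unfold pairsFrom
  have htail : (l.map (· + 1)).tail ++ [n + 1] = (l.tail ++ [n]).map (· + 1) := by
    cases l <;> simp
  rw [htail, List.zip_map, List.map_map]
  apply List.map_congr_left
  intro p _
  simp only [Function.comp, Prod.map, Prod.mk.injEq]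
  refine ⟨by simp, by push_cast; omega⟩

lemma relStarts_cons (prev y : Int) (t : List Int) :
    relStarts prev (y :: t) =
      (if y = prev then ([] : List Nat) else [0]) ++ (relStarts y t).map (· + 1) := by
  unfold relStarts
  rw [show (y :: t).length = t.length + 1 from rfl, List.range_succ_eq_map]
  rw [List.filter_cons]
  have hmap : (List.filter (fun i => decide ((y :: t).getD i 0 ≠ (prev :: y :: t).getD i 0))
      (List.map Nat.succ (List.range t.length)))
      = ((List.range t.length).filter (fun i => decide (t.getD i 0 ≠ (y :: t).getD i 0))).map Nat.succ := by
    rw [List.filter_map]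
    apply congrArg (List.map Nat.succ)
    apply List.filter_congr
    intro i _
    simp [Function.comp]
  rw [hmap]
  by_cases h : y = prev <;> simp [h]

lemma headD_map_succ (l : List Nat) (n : Nat) :
    ((l.map (· + 1)).headD (n + 1)) = l.headD n + 1 := by
  cases l <;> simp

lemma pairs_eq_runsAux (t : List Int) : ∀ (prev : Int) (c : Int),
    (prev, c + ((relStarts prev t).headD t.length : Int)) ::
        pairsFrom t (relStarts prev t) t.length
      = groupbyRunsAux prev c t := by
  induction t with
  | nil => intro prev c; simp [relStarts, pairsFrom, groupbyRunsAux]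
  | cons y t' ih =>
    intro prev c
    rw [relStarts_cons]
    by_cases h : y = prev
    · subst h
      simp only [if_true, List.nil_append]
      rw [show (y :: t').length = t'.length + 1 from rfl]
      rw [headD_map_succ, pairsFrom_shift]
      have := ih y (c + 1)
      rw [show groupbyRunsAux y c (y :: t') = groupbyRunsAux y (c + 1) t' by
        simp [groupbyRunsAux]]
      rw [← this]
      congr 1
      push_cast
      ring_nf
    · simp only [if_neg h, List.cons_append, List.nil_append]
      rw [show groupbyRunsAux prev c (y :: t') = (prev, c) :: groupbyRunsAux y 1 t' by
        simp [groupbyRunsAux, h]]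
      rw [show (y :: t').length = t'.length + 1 from rfl]
      unfold pairsFrom
      cases hl : relStarts y t' with
      | nil =>
        simp only [List.map_nil]
        have := ih y 1
        rw [hl] at this
        simp only [List.headD_nil] at this
        simp only [pairsFrom, List.zip_nil_left, List.map_nil] at this ⊢
        simp only [List.tail_cons, List.nil_append, List.zip_cons_cons, List.zip_nil_left,
          List.map_cons, List.map_nil]
        rw [← this]
        simp
        omega
      | cons a l' =>
        have := ih y 1
        rw [hl] at this
        simp only [List.headD_cons] at this
        simp only [List.map_cons, List.tail_cons, List.cons_append, List.zip_cons_cons,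
          List.map_cons]
        rw [← pairsFrom_shift y t' (a :: l') t'.length] at this
        unfold pairsFrom at this
        simp only [List.map_cons, List.tail_cons] at this
        rw [← this]
        simp only [List.getD_cons_zero, List.headD_cons, Nat.cast_zero, add_zero]
        congr 2
        push_cast
        ring_nf
      
lemma bStarts_cons (x : Int) (t : List Int) :
    bStarts (x :: t) = 0 :: (relStarts x t).map (· + 1) := by
  unfold bStarts relStarts
  rw [show (x :: t).length = t.length + 1 from rfl, List.range_succ_eq_map]
  rw [List.filter_cons]
  simp only [beq_self_eq_true, Bool.true_or, if_pos]
  congr 1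
  rw [List.filter_map]
  rw [show (fun (i : Nat) => i + 1) = Nat.succ from funext fun i => rfl]
  apply congrArg (List.map Nat.succ)
  apply List.filter_congr
  intro i _
  simp [Function.comp]

lemma pairsFrom_bStarts (x : Int) (t : List Int) :
    pairsFrom (x :: t) (bStarts (x :: t)) (x :: t).length = groupbyRunsAux x 1 t := by
  rw [bStarts_cons, show (x :: t).length = t.length + 1 from rfl]
  unfold pairsFrom
  cases hl : relStarts x t with
  | nil =>
    have := pairs_eq_runsAux t x 1
    rw [hl] at this
    simp only [List.headD_nil, pairsFrom, List.zip_nil_left, List.map_nil] at this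
    rw [← this]
    simp
    omega
  | cons a l' =>
    have := pairs_eq_runsAux t x 1
    rw [hl] at this
    simp only [List.headD_cons] at this
    rw [← pairsFrom_shift x t (a :: l') t.length] at this
    unfold pairsFrom at this
    simp only [List.map_cons, List.tail_cons] at this
    simp only [List.map_cons, List.tail_cons, List.cons_append, List.zip_cons_cons,
      List.map_cons]
    rw [← this]
    simp only [List.getD_cons_zero]
    congr 2
    push_cast
    ring_nf

theorem print_summary_spec : Claim_equal_print_summary := by
  intro my_list _ hpre
  unfold Spec_print_summary print_summary print_summary_alt
  match my_list, hpre with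
  | x :: xs, _ =>
    simp only [ne_eq, reduceCtorEq, not_false_iff, if_pos]
    have h0 : some x ≠ (none : Option Int) := by simp
    simp only [List.foldl_cons, if_pos h0, pyFlush]
    have hA := loop_eq_runsAux xs x 1 []
    simp only [pyFlush] at hA
    rw [hA]
    have hB : ((bStarts (x :: xs)).zip ((bStarts (x :: xs)).tail ++ [(x :: xs).length])).map
        (fun p => renderRun ((x :: xs).getD p.1 0) ((p.2 : Int) - (p.1 : Int)))
        = (groupbyRunsAux x 1 xs).map (fun p => renderRun p.1 p.2) := by
      rw [← pairsFrom_bStarts x xs]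
      unfold pairsFrom
      rw [List.map_map]
      rfl
    simp only [List.nil_append]
    rw [hB]
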